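-- pv_equiv track=rewrite | github.com/leoschur/blender-lithtech-dat-import | utils.py | decompress_lm_data
-- ===== SOURCE A (Python) =====
-- def decompress_lm_data(compressed):
--     """RLE decompression
--     Arts:
--         compressed (byte array): Compressed data
--     Returns:
--         decompressed (list): Decompressed data
--     """
--     decompressed = []
--     i = 0
--     while i < len(compressed):
--         tag = compressed[i]
--         i += 1
--         # see if it is a run or a span
--         is_run = True if tag & 0x80 else False  # (tag & 0x80) != 0
--         # blit the color span
--         run_len = (tag & 0x7F) + 1
--         j = 0
--         while j < run_len:
--             j += 1
--             decompressed.append(compressed[i])  # r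
--             decompressed.append(compressed[i + 1])  # g
--             decompressed.append(compressed[i + 2])  # b
--             decompressed.append(1)  # a this is for the transparancy
--             if not is_run:
--                 i += 3
--                 pass
--             continue
--         if is_run:
--             i += 3
--             pass
--         continue
--     return decompressed
-- ===== SOURCE B (Python) =====
-- def decompress_lm_data(compressed):
--     """RLE decompression, two staged passes: first build an offset plan (the
--     absolute source offset of each output pixel), then materialize RGBA from it."""
--     # pass 1: tag parsing only -- one source offset per output pixel
--     offsets = []
--     i = 0
--     n = len(compressed)
--     while i < n:
--         tag = compressed[i]
--         count = (tag & 0x7F) + 1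
--         if tag & 0x80:
--             offsets.extend([i + 1] * count)   # run: same triple count times
--             i += 4
--         else:
--             for j in range(count):            # span: count successive triples
--                 offsets.append(i + 1 + 3 * j)
--             i += 1 + 3 * count
--     # pass 2: materialize RGBA from the plan
--     out = []
--     for p in offsets:
--         out.extend((compressed[p], compressed[p + 1], compressed[p + 2], 1))
--     return out
-- ===== Notes on version B (the rewrite author's own statement) =====
-- stated objective: alternative
-- what changed: B is a staged two-pass algorithm with an intermediate data structure: pass 1 scans only the tags and builds an offset plan (one absolute source offset per output pixel), pass 2 maps that plan to the RGBA stream; A is a single fused pass of nested while loops appending channels while conditionally advancing the read pointer inside the inner loop.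
import Mathlib
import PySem

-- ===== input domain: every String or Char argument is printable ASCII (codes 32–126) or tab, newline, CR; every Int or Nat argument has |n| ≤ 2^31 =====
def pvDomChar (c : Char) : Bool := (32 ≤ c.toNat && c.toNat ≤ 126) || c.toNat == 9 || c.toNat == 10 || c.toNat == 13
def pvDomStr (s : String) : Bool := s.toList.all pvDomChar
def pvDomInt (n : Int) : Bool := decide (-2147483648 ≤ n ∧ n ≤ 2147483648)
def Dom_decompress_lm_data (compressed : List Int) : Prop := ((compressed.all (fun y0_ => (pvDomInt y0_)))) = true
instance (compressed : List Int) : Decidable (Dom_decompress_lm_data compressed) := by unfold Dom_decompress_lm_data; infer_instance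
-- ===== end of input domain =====

-- B is a staged two-pass algorithm: pass 1 builds an offset plan (the absolute source
-- offset of each output pixel), pass 2 materializes RGBA from it; objective: alternative.
-- Out-of-range reads (only reachable outside Pre_) are ported with pyGet? defaulted to 0.

-- ===== PORT A =====
-- A's inner 'while j < run_len' loop: state = (decompressed-so-far, offset into rest);
-- the offset advances inside the loop only when not a run, exactly as in A.
def pvInnerA (rest : List Int) (is_run : Bool) : Nat → List Int → Int → (List Int × Int)
  | 0, acc, k => (acc, k)
  | Nat.succ j, acc, k =>
    let acc' := acc ++ [(PySem.List.pyGet? rest k).getD 0,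
                        (PySem.List.pyGet? rest (k + 1)).getD 0,
                        (PySem.List.pyGet? rest (k + 2)).getD 0, 1]
    pvInnerA rest is_run j acc' (if is_run then k else k + 3)

def decompress_lm_data : List Int → List Int
  | [] => []
  | tag :: rest =>
    let is_run : Bool := PySem.Int.band tag 0x80 != 0
    let run_len : Int := PySem.Int.band tag 0x7F + 1
    let st := pvInnerA rest is_run run_len.toNat [] 0
    let k := if is_run then st.2 + 3 else st.2
    st.1 ++ decompress_lm_data (rest.drop k.toNat)
termination_by l => l.length
decreasing_by all_goals simp

-- ===== PORT B =====
-- pass 1 of Source B: the 'while i < n' loop reading only tags, rendered as recursion on the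
-- unread suffix with the absolute index i carried along; offsets are absolute, as in Source B.
def pvOffsetsB : List Int → Int → List Int
  | [], _ => []
  | tag :: rest, i =>
    let count := (PySem.Int.band tag 0x7F + 1).toNat
    if PySem.Int.band tag 0x80 != 0 then
      List.replicate count (i + 1) ++ pvOffsetsB (rest.drop 3) (i + 4)
    else
      (List.range count).map (fun j : Nat => i + 1 + 3 * (j : Int))
        ++ pvOffsetsB (rest.drop (3 * count)) (i + 1 + 3 * count)
termination_by l _ => l.length
decreasing_by all_goals simp

-- pass 2 of Source B: extend out with (r, g, b, 1) for each planned offset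
def decompress_lm_data_alt (compressed : List Int) : List Int :=
  (pvOffsetsB compressed 0).flatMap (fun p =>
    [(PySem.List.pyGet? compressed p).getD 0,
     (PySem.List.pyGet? compressed (p + 1)).getD 0,
     (PySem.List.pyGet? compressed (p + 2)).getD 0, 1])

-- ===== PRECONDITION & SPEC =====
-- Pre_ excludes exactly the malformed (truncated) streams, on which Python A raises
-- IndexError: a well-formed stream is a sequence of blocks, each a tag followed by 3 bytes
-- (run tag, high bit set) or by 3*count bytes (span tag, high bit clear).
inductive pvRLE : List Int → Prop
  | nil : pvRLE []
  | run (tag r g b : Int) (rest : List Int) :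
      PySem.Int.band tag 0x80 ≠ 0 → pvRLE rest → pvRLE (tag :: r :: g :: b :: rest)
  | span (tag : Int) (px rest : List Int) :
      PySem.Int.band tag 0x80 = 0 → px.length = 3 * (PySem.Int.band tag 0x7F + 1).toNat →
      pvRLE rest → pvRLE (tag :: (px ++ rest))

def Pre_decompress_lm_data (compressed : List Int) : Prop := pvRLE compressed

-- decision procedure for the grammar (fuel = list length, structural so `decide` computes)
def pvRLEdec : Nat → List Int → Bool
  | _, [] => true
  | 0, _ :: _ => false
  | fuel + 1, tag :: rest =>
    if PySem.Int.band tag 0x80 != 0 then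
      decide (3 ≤ rest.length) && pvRLEdec fuel (rest.drop 3)
    else
      decide (3 * (PySem.Int.band tag 0x7F + 1).toNat ≤ rest.length)
        && pvRLEdec fuel (rest.drop (3 * (PySem.Int.band tag 0x7F + 1).toNat))

lemma pvRLEdec_iff (fuel : Nat) : ∀ l : List Int, l.length ≤ fuel →
    (pvRLEdec fuel l = true ↔ pvRLE l) := by
  induction fuel with
  | zero =>
    intro l hl
    have : l = [] := List.eq_nil_of_length_eq_zero (by omega)
    subst this
    simp [pvRLEdec, pvRLE.nil]
  | succ fuel ih =>
    intro l hl
    match l with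
    | [] => simp [pvRLEdec, pvRLE.nil]
    | tag :: rest =>
      rw [pvRLEdec]
      by_cases hb : PySem.Int.band tag 0x80 = 0
      · simp only [hb, bne_self_eq_false, Bool.false_eq_true, if_false, Bool.and_eq_true,
          decide_eq_true_eq]
        constructor
        · rintro ⟨hlen, hrec⟩
          have hpre := (ih _ (by simp at hl ⊢; omega)).mp hrec
          have hsplit : tag :: rest
              = tag :: (rest.take (3 * (PySem.Int.band tag 0x7F + 1).toNat)
                  ++ rest.drop (3 * (PySem.Int.band tag 0x7F + 1).toNat)) := by
            simp
          rw [hsplit]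
          exact pvRLE.span tag _ _ hb (by simp; omega) hpre
        · intro hp
          cases hp with
          | run _ _ _ _ _ hb' _ => exact absurd hb hb'
          | span _ px rest' hb' hlen hrec =>
            refine ⟨by simp [hlen], ?_⟩
            have : (px ++ rest').drop (3 * (PySem.Int.band tag 0x7F + 1).toNat) = rest' := by
              rw [← hlen, List.drop_left]
            rw [this]
            exact (ih _ (by simp at hl ⊢; omega)).mpr hrec
      · simp only [if_pos (bne_iff_ne.mpr hb), Bool.and_eq_true, decide_eq_true_eq]
        constructor
        · rintro ⟨hlen, hrec⟩
          match rest with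
          | r :: g :: b :: rest' =>
            exact pvRLE.run tag r g b rest' hb
              ((ih _ (by simp at hl ⊢; omega)).mp (by simpa using hrec))
        · intro hp
          cases hp with
          | run _ r g b rest' _ hrec =>
            exact ⟨by simp, (ih _ (by simp at hl ⊢; omega)).mpr (by simpa using hrec)⟩
          | span _ px rest' hb' _ _ => exact absurd hb' hb

instance (compressed : List Int) : Decidable (Pre_decompress_lm_data compressed) :=
  decidable_of_iff (pvRLEdec compressed.length compressed = true)
    (pvRLEdec_iff compressed.length compressed le_rfl)

def pvWitness_decompress_lm_data : List Int := [130, 10, 20, 30, 1, 5, 6, 7, 8, 9, 10]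

def Spec_decompress_lm_data (compressed : List Int) (out : List Int) : Prop := out = decompress_lm_data_alt compressed
instance (compressed : List Int) (out : List Int) : Decidable (Spec_decompress_lm_data compressed out) := by unfold Spec_decompress_lm_data; infer_instance

-- ===== CLAIM (what is proved, stated in full; the proofs are below) =====
def Claim_equal_decompress_lm_data : Prop := ∀ (compressed : List Int), Dom_decompress_lm_data compressed → Pre_decompress_lm_data compressed → Spec_decompress_lm_data compressed (decompress_lm_data compressed)

-- ===== LEMMAS AND PROOFS =====
def pvPix (rest : List Int) (k : Int) : List Int :=
  [(PySem.List.pyGet? rest k).getD 0, (PySem.List.pyGet? rest (k + 1)).getD 0,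
   (PySem.List.pyGet? rest (k + 2)).getD 0, 1]

lemma pvInnerA_run (rest : List Int) (n : Nat) (acc : List Int) (k : Int) :
    pvInnerA rest true n acc k
      = (acc ++ List.flatten (List.replicate n (pvPix rest k)), k) := by
  induction n generalizing acc with
  | zero => simp [pvInnerA]
  | succ n ih => simp [pvInnerA, ih, pvPix, List.replicate_succ]

lemma pvInnerA_span (rest : List Int) (n : Nat) (acc : List Int) (k : Int) :
    pvInnerA rest false n acc k
      = (acc ++ List.flatten ((List.range n).map (fun j : Nat => pvPix rest (k + 3 * (j : Int)))),
         k + 3 * n) := by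
  induction n generalizing acc k with
  | zero => simp [pvInnerA]
  | succ n ih =>
    rw [pvInnerA]
    simp only [Bool.false_eq_true, if_false, ih, List.range_succ_eq_map, List.map_cons,
      List.map_map, List.flatten_cons, Function.comp_def]
    rw [Prod.mk.injEq]
    refine ⟨?_, by push_cast; ring⟩
    rw [List.append_assoc]
    congr 1
    congr 1
    · simp [pvPix]
    · congr 1
      refine List.map_congr_left fun j _ => ?_
      congr 1
      push_cast
      ring

-- reading through a drop at a nonnegative relative index = reading the whole list absolutely
lemma pvGet_drop (l : List Int) (m k : Nat) :
    (PySem.List.pyGet? (l.drop m) (k : Int)).getD 0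
      = (PySem.List.pyGet? l ((m : Int) + k)).getD 0 := by
  have h : ((m : Int) + k) = ((m + k : Nat) : Int) := by push_cast; ring
  rw [h, PySem.List.pyGet?_natCast, PySem.List.pyGet?_natCast, List.getElem?_drop]

lemma pvPix_drop (l : List Int) (m k : Nat) :
    pvPix (l.drop m) (k : Int)
      = pvPix l ((m : Int) + k) := by
  unfold pvPix
  have h1 : ((k : Int) + 1) = ((k + 1 : Nat) : Int) := by push_cast; ring
  have h2 : ((k : Int) + 2) = ((k + 2 : Nat) : Int) := by push_cast; ring
  rw [pvGet_drop l m k, h1, pvGet_drop l m (k + 1), h2, pvGet_drop l m (k + 2)]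
  push_cast
  ring_nf

lemma pvMain (n : Nat) : ∀ (l s : List Int) (m : Nat), s.length ≤ n → l.drop m = s →
    decompress_lm_data s = (pvOffsetsB s (m : Int)).flatMap (pvPix l) := by
  induction n with
  | zero =>
    intro l s m hl hd
    have : s = [] := List.eq_nil_of_length_eq_zero (by omega)
    subst this; rw [decompress_lm_data, pvOffsetsB]; simp
  | succ n ih =>
    intro l s m hl hd
    match s with
    | [] => rw [decompress_lm_data, pvOffsetsB]; simp
    | tag :: rest =>
      have hrest : l.drop (m + 1) = rest := by
        rw [← List.tail_drop, hd]
        rfl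
      have hrlen : ∀ q : Nat, (rest.drop q).length ≤ n := by
        intro q; simp at hl ⊢; omega
      have hdq : ∀ q : Nat, l.drop (m + 1 + q) = rest.drop q := by
        intro q; rw [← hrest, List.drop_drop]
      rw [decompress_lm_data, pvOffsetsB]
      cases hb : PySem.Int.band tag 0x80 != 0
      · -- span
        simp only [Bool.false_eq_true, if_false, pvInnerA_span]
        have hk : (((0 : Int) + 3 * (((PySem.Int.band tag 0x7F + 1).toNat : Nat) : Int))).toNat
            = 3 * (PySem.Int.band tag 0x7F + 1).toNat := by omega
        rw [hk, ih l _ (m + 1 + 3 * (PySem.Int.band tag 0x7F + 1).toNat) (hrlen _) (hdq _)]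
        rw [List.flatMap_append, List.flatMap_eq_foldl]
        simp only [List.nil_append]
        rw [← List.flatMap_eq_foldl, List.flatMap_map]
        congr 1
        · congr 1
          refine List.map_congr_left fun j hj => ?_
          have h1 : ((0 : Int) + 3 * (j : Int)) = ((3 * j : Nat) : Int) := by push_cast; ring
          rw [h1, ← hrest, pvPix_drop l (m + 1) (3 * j)]
          congr 1
      · -- run
        simp only [if_true, pvInnerA_run]
        rw [show ((0 : Int) + 3).toNat = 3 by decide,
          ih l _ (m + 4) (hrlen 3) (by rw [← hdq 3])]
        rw [List.flatMap_append, List.flatMap_replicate]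
        congr 2
        · have h0 : ((m : Int) + 1) = (((m + 1 : Nat) : Nat) : Int) + (0 : Nat) := by
            push_cast; ring
          rw [h0, ← pvPix_drop l (m + 1) 0, hrest]
          norm_num

-- ===== VERDICT (by name: the statement is the Claim_ definition above) =====
theorem decompress_lm_data_spec : Claim_equal_decompress_lm_data := by
  intro compressed _ _
  unfold Spec_decompress_lm_data decompress_lm_data_alt
  rw [pvMain compressed.length compressed compressed 0 le_rfl (by simp)]
  unfold pvPix
  rfl
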